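-- pv_equiv track=rewrite | github.com/donglam1824/Project2 | waypoint_evaluation.py | evaluate_waypoints
-- ===== SOURCE A (Python) =====
-- def evaluate_waypoints(waypoints):
--     total_distance = 0
--     turns = 0
--     prev_direction = None
--
--     for i in range(1, len(waypoints)):
--         x1, y1 = waypoints[i - 1]
--         x2, y2 = waypoints[i]
--
--         dx = x2 - x1
--         dy = y2 - y1
--
--         total_distance += 1
--
--         if dx != 0:
--             direction = 'horizontal'
--         elif dy != 0:
--             direction = 'vertical'
--         else:
--             direction = prev_direction
--
--         if prev_direction and direction != prev_direction:
--             turns += 1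
--
--         prev_direction = direction
--
--     return total_distance, turns
-- ===== SOURCE B (Python) =====
-- def evaluate_waypoints(waypoints):
--     total_distance = 0
--     directions = []
--     for i in range(1, len(waypoints)):
--         x1, y1 = waypoints[i - 1]
--         x2, y2 = waypoints[i]
--         total_distance += 1
--         if x2 - x1 != 0:
--             directions.append('horizontal')
--         elif y2 - y1 != 0:
--             directions.append('vertical')
--     turns = sum(1 for i in range(1, len(directions))
--                 if directions[i] != directions[i - 1])
--     return total_distance, turns
-- ===== Notes on version B (the rewrite author's own statement) =====
-- stated objective: simpler
-- what changed: Instead of carrying a forward-filled prev_direction through one loop, B collects the directions of the nonzero segments into a list (zero segments are simply skipped) and counts turns as adjacent unequal pairs in a second pass.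
import Mathlib
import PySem

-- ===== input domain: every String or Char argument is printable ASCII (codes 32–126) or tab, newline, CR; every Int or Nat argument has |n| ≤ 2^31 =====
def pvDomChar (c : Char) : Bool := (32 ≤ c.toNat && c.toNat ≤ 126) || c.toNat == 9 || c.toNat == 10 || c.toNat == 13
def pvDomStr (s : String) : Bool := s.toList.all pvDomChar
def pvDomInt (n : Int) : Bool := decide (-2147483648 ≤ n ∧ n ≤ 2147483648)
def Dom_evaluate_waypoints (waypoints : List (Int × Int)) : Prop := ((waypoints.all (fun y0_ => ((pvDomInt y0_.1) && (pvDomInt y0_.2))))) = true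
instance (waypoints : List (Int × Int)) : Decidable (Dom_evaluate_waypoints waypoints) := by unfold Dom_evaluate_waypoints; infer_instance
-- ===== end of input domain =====

-- B collects the nonzero-segment directions into a list and counts adjacent unequal
-- pairs in a second pass, instead of A's single loop with a forward-filled prev_direction.

-- ===== PORT A =====
-- A's loop over i in range(1, len): recursion carrying the previous point and the
-- state (total_distance, turns, prev_direction). Python truthiness of prev_direction
-- (None and "" falsy) is transliterated as prev ≠ none ∧ prev ≠ some "".
def evalLoopA : (Int × Int) → List (Int × Int) → Int → Int → Option String → Int × Int
  | _, [], total, turns, _ => (total, turns)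
  | (x1, y1), (x2, y2) :: rest, total, turns, prev =>
    let dx := x2 - x1
    let dy := y2 - y1
    let direction : Option String :=
      if dx ≠ 0 then some "horizontal"
      else if dy ≠ 0 then some "vertical"
      else prev
    let turns' := if (prev ≠ none ∧ prev ≠ some "") ∧ direction ≠ prev then turns + 1 else turns
    evalLoopA (x2, y2) rest (total + 1) turns' direction

def evaluate_waypoints (waypoints : List (Int × Int)) : Int × Int :=
  match waypoints with
  | [] => (0, 0)
  | p :: rest => evalLoopA p rest 0 0 none

-- ===== PORT B =====
-- B's first loop: build (directions, total_distance) over adjacent pairs.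
def dirsLoopB : (Int × Int) → List (Int × Int) → List String × Int
  | _, [] => ([], 0)
  | (x1, y1), (x2, y2) :: rest =>
    let (ds, n) := dirsLoopB (x2, y2) rest
    if x2 - x1 ≠ 0 then ("horizontal" :: ds, n + 1)
    else if y2 - y1 ≠ 0 then ("vertical" :: ds, n + 1)
    else (ds, n + 1)

-- B's second pass: sum over i in range(1, len(directions)) of adjacent inequality.
def countTurnsB : List String → Int
  | a :: b :: t => (if a ≠ b then 1 else 0) + countTurnsB (b :: t)
  | _ => 0

def evaluate_waypoints_alt (waypoints : List (Int × Int)) : Int × Int :=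
  match waypoints with
  | [] => (0, 0)
  | p :: rest =>
    let (ds, n) := dirsLoopB p rest
    (n, countTurnsB ds)

-- ===== PRECONDITION & SPEC =====
def Spec_evaluate_waypoints (waypoints : List (Int × Int)) (out : Int × Int) : Prop := out = evaluate_waypoints_alt waypoints
instance (waypoints : List (Int × Int)) (out : Int × Int) : Decidable (Spec_evaluate_waypoints waypoints out) := by unfold Spec_evaluate_waypoints; infer_instance

-- ===== CLAIM (what is proved, stated in full; the proofs are below) =====
def Claim_equal_evaluate_waypoints : Prop := ∀ (waypoints : List (Int × Int)), Dom_evaluate_waypoints waypoints → Spec_evaluate_waypoints waypoints (evaluate_waypoints waypoints)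

-- ===== LEMMAS AND PROOFS =====

-- the turns B's second pass would count if `prev` (A's carried direction) preceded `ds`
def turnsFrom : Option String → List String → Int
  | none, ds => countTurnsB ds
  | some d, ds => countTurnsB (d :: ds)

-- loop invariant: A's loop equals total + segment count, turns + transitions of
-- (prev prefixed to the remaining directions), provided prev is none or a nonempty string
theorem evalLoopA_eq (rest : List (Int × Int)) : ∀ (p : Int × Int) (total turns : Int)
    (prev : Option String), (prev = none ∨ prev = some "horizontal" ∨ prev = some "vertical") →
    evalLoopA p rest total turns prev =
      (total + (dirsLoopB p rest).2, turns + turnsFrom prev (dirsLoopB p rest).1) := by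
  induction rest with
  | nil =>
    intro p total turns prev _
    simp [evalLoopA, dirsLoopB, turnsFrom]
    rcases prev with _ | d <;> simp [countTurnsB]
  | cons q t ih =>
    intro p total turns prev hprev
    obtain ⟨x1, y1⟩ := p
    obtain ⟨x2, y2⟩ := q
    by_cases hdx : x2 - x1 ≠ 0
    · rw [show evalLoopA (x1,y1) ((x2,y2)::t) total turns prev =
        evalLoopA (x2,y2) t (total+1)
          (if (prev ≠ none ∧ prev ≠ some "") ∧ (some "horizontal" : Option String) ≠ prev then turns+1 else turns)
          (some "horizontal") by simp [evalLoopA, hdx] <;> exact ⟨trivial, trivial⟩]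
      rw [ih _ _ _ _ (by tauto)]
      rcases hprev with h | h | h <;> subst h <;>
        simp [dirsLoopB, hdx, turnsFrom, countTurnsB] <;> first | (constructor <;> first | trivial | ring) | trivial | ring
    · by_cases hdy : y2 - y1 ≠ 0
      · rw [show evalLoopA (x1,y1) ((x2,y2)::t) total turns prev =
          evalLoopA (x2,y2) t (total+1)
            (if (prev ≠ none ∧ prev ≠ some "") ∧ (some "vertical" : Option String) ≠ prev then turns+1 else turns)
            (some "vertical") by simp [evalLoopA, hdx, hdy] <;> exact ⟨trivial, trivial⟩]
        rw [ih _ _ _ _ (by tauto)]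
        rcases hprev with h | h | h <;> subst h <;>
          simp [dirsLoopB, hdx, hdy, turnsFrom, countTurnsB] <;> first | (constructor <;> first | trivial | ring) | trivial | ring
      · rw [show evalLoopA (x1,y1) ((x2,y2)::t) total turns prev =
          evalLoopA (x2,y2) t (total+1) turns prev by simp [evalLoopA, hdx, hdy] <;> exact ⟨trivial, trivial⟩]
        rw [ih _ _ _ _ hprev]
        simp [dirsLoopB, hdx, hdy]
        ring

-- ===== VERDICT (by name: the statement is the Claim_ definition above) =====
theorem evaluate_waypoints_spec : Claim_equal_evaluate_waypoints := by
  intro waypoints _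
  unfold Spec_evaluate_waypoints
  cases waypoints with
  | nil => rfl
  | cons p rest =>
    show evalLoopA p rest 0 0 none =
      (match dirsLoopB p rest with | (ds, n) => (n, countTurnsB ds))
    rw [evalLoopA_eq rest p 0 0 none (Or.inl rfl)]
    cases h : dirsLoopB p rest with
    | mk ds n => simp [turnsFrom]
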